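-- pv_equiv track=rewrite | github.com/Kevin-san/ToolLesson | core/alvinreadparser/pdfreader.py | to_tab_cnt_key_map
-- ===== SOURCE A (Python) =====
-- def to_tab_cnt_key_map(span_dicts):
--     tab_key_map = dict()
--     for pdf_key, span_items in span_dicts.items():
--         spec_key = len(span_items)
--         if spec_key in tab_key_map:
--             tab_key_map[spec_key].append(pdf_key)
--         else:
--             tab_key_map[spec_key] = [pdf_key]
--     return tab_key_map
-- ===== SOURCE B (Python) =====
-- def to_tab_cnt_key_map(span_dicts):
--     pairs = [(pdf_key, len(span_items)) for pdf_key, span_items in span_dicts.items()]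
--     counts = dict.fromkeys(c for _, c in pairs)
--     return {c: [k for k, cc in pairs if cc == c] for c in counts}
-- ===== Notes on version B (the rewrite author's own statement) =====
-- stated objective: alternative
-- what changed: Replaces the single incremental present/absent-branch dict loop with a declarative two-phase grouping: precompute (key, count) pairs, dedup the counts in first-appearance order, then build each bucket by filtering the pairs.
import Mathlib
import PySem

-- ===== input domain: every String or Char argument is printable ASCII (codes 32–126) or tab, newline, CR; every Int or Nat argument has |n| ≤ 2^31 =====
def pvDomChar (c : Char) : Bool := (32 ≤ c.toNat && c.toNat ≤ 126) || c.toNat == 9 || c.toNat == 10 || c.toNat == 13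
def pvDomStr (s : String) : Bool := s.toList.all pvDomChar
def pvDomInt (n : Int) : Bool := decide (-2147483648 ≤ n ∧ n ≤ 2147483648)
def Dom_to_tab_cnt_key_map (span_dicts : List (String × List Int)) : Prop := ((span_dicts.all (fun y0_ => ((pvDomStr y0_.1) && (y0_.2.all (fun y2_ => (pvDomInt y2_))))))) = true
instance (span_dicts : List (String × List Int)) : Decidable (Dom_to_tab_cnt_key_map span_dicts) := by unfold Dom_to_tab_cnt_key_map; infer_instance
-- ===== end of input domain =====

-- B regroups declaratively (pairs, dedup of counts, filter per count) instead of A's incremental dict pass with a present/absent branch; objective: alternative, same cost.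


-- ===== PORT A =====
-- Port of A: one incremental pass building a dict; present keys append, absent keys insert a fresh singleton.
def to_tab_cnt_key_map (span_dicts : List (String × List Int)) : List (Int × List String) :=
  (span_dicts.foldl
    (fun tab_key_map p =>
      let spec_key : Int := (p.2.length : Int)
      if tab_key_map.contains spec_key then
        tab_key_map.modify spec_key [] (· ++ [p.1])   -- tab_key_map[spec_key].append(pdf_key)
      else
        tab_key_map.insert spec_key [p.1])
    PySem.Dict.empty).items

-- ===== PORT B =====
-- Port of B: (key, count) pairs, dedup of counts in first-appearance order, then one bucket per count by filtering.
def to_tab_cnt_key_map_alt (span_dicts : List (String × List Int)) : List (Int × List String) :=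
  let pairs := span_dicts.map (fun p => (p.1, (p.2.length : Int)))
  let counts := PySem.List.dedup (pairs.map (·.2))
  counts.map (fun c => (c, (pairs.filter (fun q => q.2 == c)).map (·.1)))

-- ===== PRECONDITION & SPEC =====
def Spec_to_tab_cnt_key_map (span_dicts : List (String × List Int)) (out : List (Int × List String)) : Prop := out = to_tab_cnt_key_map_alt span_dicts
instance (span_dicts : List (String × List Int)) (out : List (Int × List String)) : Decidable (Spec_to_tab_cnt_key_map span_dicts out) := by unfold Spec_to_tab_cnt_key_map; infer_instance

-- ===== CLAIM (what is proved, stated in full; the proofs are below) =====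
def Claim_equal_to_tab_cnt_key_map : Prop := ∀ (span_dicts : List (String × List Int)), Dom_to_tab_cnt_key_map span_dicts → Spec_to_tab_cnt_key_map span_dicts (to_tab_cnt_key_map span_dicts)

-- ===== LEMMAS AND PROOFS =====

-- ===== VERDICT (by name: the statement is the Claim_ definition above) =====
-- A's step: when the key is absent, insert of a fresh singleton is modify with default [].
lemma stepA_modify_of_not_contains (d : PySem.Dict Int (List String)) (c : Int) (k : String)
    (h : d.contains c = false) :
    d.modify c [] (· ++ [k]) = d.insert c [k] := by
  simp [PySem.Dict.modify, PySem.Dict.insert, h, PySem.Dict.getD_of_not_contains d [] h]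

-- A's fold equals a pure modify fold over the swapped (count, key) pairs.
lemma foldA_eq_foldl_modify (span_dicts : List (String × List Int)) :
    (span_dicts.foldl
      (fun tab_key_map p =>
        let spec_key : Int := (p.2.length : Int)
        if tab_key_map.contains spec_key then
          tab_key_map.modify spec_key [] (· ++ [p.1])
        else
          tab_key_map.insert spec_key [p.1])
      PySem.Dict.empty) =
    ((span_dicts.map (fun p => ((p.2.length : Int), p.1))).foldl
      (fun d q => d.modify q.1 [] (· ++ [q.2])) PySem.Dict.empty) := by
  rw [List.foldl_map]
  apply PySem.List.foldl_congr_mem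
  intro d p _
  by_cases h : d.contains ((p.2.length : Int))
  · simp [h]
  · simp [h, stepA_modify_of_not_contains d _ p.1 (by simpa using h)]

-- the items of a dict with Nodup keys are its keys paired with their getD values
lemma items_eq_map_keys (d : PySem.Dict Int (List String)) (h : d.keys.Nodup) :
    d.items = d.keys.map (fun c => (c, d.getD c [])) := by
  simp only [PySem.Dict.keys, List.map_map]
  have : ∀ p ∈ d.items, (fun p => (p.1, d.getD p.1 [])) p = id p := by
    intro p hp
    have := PySem.Dict.getD_of_mem_items d (k := p.1) (v := p.2) (by simpa using hp) h []
    simp [this]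
  calc d.items = d.items.map id := by simp
    _ = d.items.map (fun p => (p.1, d.getD p.1 [])) := (List.map_congr_left this).symm
    _ = _ := by rfl

theorem to_tab_cnt_key_map_spec : Claim_equal_to_tab_cnt_key_map := by
  intro span_dicts _hdom
  unfold Spec_to_tab_cnt_key_map to_tab_cnt_key_map to_tab_cnt_key_map_alt
  rw [foldA_eq_foldl_modify]
  set l := span_dicts.map (fun p => ((p.2.length : Int), p.1)) with hl
  have hnodup : ((l.foldl (fun d q => d.modify q.1 [] (· ++ [q.2])) PySem.Dict.empty)).keys.Nodup := by
    exact PySem.Dict.nodup_keys_foldl_modify_key l Prod.fst [] (fun _ q v => v ++ [q.2])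
      PySem.Dict.empty (by simp)
  rw [items_eq_map_keys _ hnodup]
  rw [PySem.Dict.keys_foldl_modify_key l Prod.fst [] (fun _ q v => v ++ [q.2]) PySem.Dict.empty]
  show _ = (PySem.List.dedup ((span_dicts.map (fun p => (p.1, (p.2.length : Int)))).map (·.2))).map
    (fun c => (c, ((span_dicts.map (fun p => (p.1, (p.2.length : Int)))).filter (fun q => q.2 == c)).map (·.1)))
  have hkeys : PySem.Set.update (PySem.Dict.empty : PySem.Dict Int (List String)).keys (l.map Prod.fst)
      = PySem.List.dedup ((span_dicts.map (fun p => (p.1, (p.2.length : Int)))).map (·.2)) := by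
    simp only [hl, List.map_map, PySem.List.dedup_eq_ofList]
    rfl
  rw [hkeys]
  apply List.map_congr_left
  intro c _
  rw [PySem.Dict.getD_foldl_modify_append l PySem.Dict.empty c]
  simp [hl, List.filter_map, List.map_map, Function.comp_def]
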